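-- pv_equiv track=rewrite | github.com/And1F/CodeWars | 0125_skiponacci.py | skiponacci
-- ===== SOURCE A (Python) =====
-- def skiponacci(n):
--     ans = "1"
--     a = 1
--     b = 1
--     for i in range(n-1):
--         b = a + b
--         a = b - a
--         if i % 2 == 0: ans += " skip"
--         else: ans += f" {a}"
--     return ans
-- ===== SOURCE B (Python) =====
-- def skiponacci(n):
--     # Maintain only the emitted numbers 1,2,5,13,... via x_k = 3*x_{k-1} - x_{k-2},
--     # collecting tokens in a list and joining once at the end.
--     parts = ['1']
--     a, b = 1, 2
--     for i in range(n - 1):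
--         if i % 2 == 0:
--             parts.append('skip')
--         else:
--             parts.append(str(b))
--             a, b = b, 3 * b - a
--     return ' '.join(parts)
-- ===== Notes on version B (the rewrite author's own statement) =====
-- stated objective: alternative
-- what changed: B drops A's full Fibonacci pair update per iteration: it maintains only the emitted every-other-Fibonacci numbers via the recurrence x = triple the previous minus the one before that, advancing its pair solely on number-emitting steps, and builds the result as a token list joined once instead of repeated string concatenation.
import Mathlib
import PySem

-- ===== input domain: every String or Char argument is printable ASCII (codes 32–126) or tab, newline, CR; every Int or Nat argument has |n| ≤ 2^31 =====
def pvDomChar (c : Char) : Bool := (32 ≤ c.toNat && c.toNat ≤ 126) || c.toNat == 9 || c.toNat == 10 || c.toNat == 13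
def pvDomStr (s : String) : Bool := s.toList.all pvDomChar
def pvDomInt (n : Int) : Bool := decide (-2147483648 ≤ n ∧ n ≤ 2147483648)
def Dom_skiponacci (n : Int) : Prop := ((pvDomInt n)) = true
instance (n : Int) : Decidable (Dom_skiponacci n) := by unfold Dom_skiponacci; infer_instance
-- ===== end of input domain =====

-- B replaces A's per-iteration Fibonacci pair update by the every-other-Fibonacci recurrence
-- on the emitted numbers only, collecting tokens in a list joined once (objective: alternative).

-- ===== PORT A =====
-- for i in range(n-1): b = a+b; a = b-a; append " skip" / f" {a}"
def skiponacciLoopA (cnt : Nat) (i : Nat) (ans : String) (a b : Int) : String :=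
  match cnt with
  | 0 => ans
  | cnt' + 1 =>
    let b' := a + b
    let a' := b' - a
    let ans' := if i % 2 == 0 then ans ++ " skip" else ans ++ " " ++ PySem.Int.toStr a'
    skiponacciLoopA cnt' (i + 1) ans' a' b'

def skiponacci (n : Int) : String :=
  skiponacciLoopA (n - 1).toNat 0 "1" 1 1

-- ===== PORT B =====
-- for i in range(n-1): even i → append 'skip'; odd i → append str(b); a, b = b, 3*b - a
def skiponacciLoopB (cnt : Nat) (i : Nat) (parts : List String) (a b : Int) : List String :=
  match cnt with
  | 0 => parts
  | cnt' + 1 =>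
    if i % 2 == 0 then
      skiponacciLoopB cnt' (i + 1) (parts ++ ["skip"]) a b
    else
      skiponacciLoopB cnt' (i + 1) (parts ++ [PySem.Int.toStr b]) b (3 * b - a)

def skiponacci_alt (n : Int) : String :=
  PySem.Str.join " " (skiponacciLoopB (n - 1).toNat 0 ["1"] 1 2)

-- ===== PRECONDITION & SPEC =====
def Spec_skiponacci (n : Int) (out : String) : Prop := out = skiponacci_alt n
instance (n : Int) (out : String) : Decidable (Spec_skiponacci n out) := by unfold Spec_skiponacci; infer_instance

-- ===== CLAIM (what is proved, stated in full; the proofs are below) =====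
def Claim_equal_skiponacci : Prop := ∀ (n : Int), Dom_skiponacci n → Spec_skiponacci n (skiponacci n)

-- ===== LEMMAS AND PROOFS =====

/-- Fibonacci over Int: fib 1 = fib 2 = 1. -/
def pvFib : Nat → Int
  | 0 => 0
  | 1 => 1
  | n + 2 => pvFib n + pvFib (n + 1)

theorem pvFib_add_two (n : Nat) : pvFib (n + 2) = pvFib n + pvFib (n + 1) := rfl

theorem pvFib_skip (n : Nat) : pvFib (n + 4) = 3 * pvFib (n + 2) - pvFib n := by
  have h1 := pvFib_add_two n
  have h2 : pvFib (n + 3) = pvFib (n + 1) + pvFib (n + 2) := by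
    simpa [Nat.add_assoc] using pvFib_add_two (n + 1)
  have h3 : pvFib (n + 4) = pvFib (n + 2) + pvFib (n + 3) := by
    simpa [Nat.add_assoc] using pvFib_add_two (n + 2)
  omega

theorem join_snoc (parts : List String) (x : String) (hp : parts ≠ []) :
    PySem.Str.join " " (parts ++ [x]) = PySem.Str.join " " parts ++ " " ++ x := by
  unfold PySem.Str.join PySem.Chars.join
  rw [List.map_append]
  have key : ∀ (l : List (List Char)), l ≠ [] →
      List.intercalate " ".toList (l ++ [x.toList]) =
        List.intercalate " ".toList l ++ " ".toList ++ x.toList := by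
    intro l hl
    induction l with
    | nil => exact absurd rfl hl
    | cons h t ih =>
      cases t with
      | nil => simp [List.intercalate]
      | cons h2 t2 =>
        have : List.intercalate " ".toList ((h :: h2 :: t2) ++ [x.toList])
            = h ++ " ".toList ++ List.intercalate " ".toList ((h2 :: t2) ++ [x.toList]) := by
          simp [List.intercalate, List.intersperse]
        rw [this, ih (by simp)]
        simp [List.intercalate, List.intersperse]
  simp only [List.map_cons, List.map_nil]
  rw [key (parts.map String.toList) (by simpa using hp)]
  rw [String.ofList_append, String.ofList_append, String.ofList_toList, String.ofList_toList]

theorem loop_eq (m : Nat) : ∀ (k : Nat) (parts : List String), parts ≠ [] →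
    skiponacciLoopA m (2 * k) (PySem.Str.join " " parts) (pvFib (2 * k + 1)) (pvFib (2 * k + 2))
      = PySem.Str.join " " (skiponacciLoopB m (2 * k) parts (pvFib (2 * k + 1)) (pvFib (2 * k + 3))) := by
  induction m using Nat.twoStepInduction with
  | zero => intro k parts _; rfl
  | one =>
    intro k parts hp
    have he : (2 * k) % 2 == 0 := by simp [Nat.mul_mod_right]
    simp only [skiponacciLoopA, skiponacciLoopB, he, if_pos, join_snoc parts "skip" hp]
    rw [show (" skip" : String) = " " ++ "skip" from rfl, ← String.append_assoc]
  | more m ih _ =>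
    intro k parts hp
    have he : ((2 * k) % 2 == 0) = true := by simp [Nat.mul_mod_right]
    have ho : ((2 * k + 1) % 2 == 0) = false := by
      simp [Nat.add_mod, Nat.mul_mod_right]
    show skiponacciLoopA (m + 2) (2 * k) _ _ _ = _
    simp only [skiponacciLoopA, skiponacciLoopB, he, ho, if_pos, if_neg, Bool.false_eq_true,
      not_false_eq_true]
    have hskip : 3 * pvFib (2 * k + 3) - pvFib (2 * k + 1) = pvFib (2 * k + 5) :=
      (pvFib_skip (2 * k + 1)).symm
    rw [hskip]
    have ha : pvFib (2 * k + 3) = pvFib (2 * k + 1) + pvFib (2 * k + 2) := by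
      simpa [Nat.add_assoc] using pvFib_add_two (2 * k + 1)
    have hb : pvFib (2 * k + 4) = pvFib (2 * k + 2) + pvFib (2 * k + 3) := by
      simpa [Nat.add_assoc] using pvFib_add_two (2 * k + 2)
    have ea : pvFib (2 * k + 1) + pvFib (2 * k + 2) - pvFib (2 * k + 1) +
        (pvFib (2 * k + 1) + pvFib (2 * k + 2)) -
        (pvFib (2 * k + 1) + pvFib (2 * k + 2) - pvFib (2 * k + 1)) = pvFib (2 * k + 3) := by omega
    have eb : pvFib (2 * k + 1) + pvFib (2 * k + 2) - pvFib (2 * k + 1) +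
        (pvFib (2 * k + 1) + pvFib (2 * k + 2)) = pvFib (2 * k + 4) := by omega
    rw [ea, eb]
    have hstr : PySem.Str.join " " parts ++ " skip" ++ " " ++ PySem.Int.toStr (pvFib (2 * k + 3))
        = PySem.Str.join " " (parts ++ ["skip"] ++ [PySem.Int.toStr (pvFib (2 * k + 3))]) := by
      rw [join_snoc (parts ++ ["skip"]) _ (by simp), join_snoc parts "skip" hp,
        show (" skip" : String) = " " ++ "skip" from rfl, ← String.append_assoc]
    rw [hstr, show 2 * k + 1 + 1 = 2 * (k + 1) from by ring,
      show 2 * k + 3 = 2 * (k + 1) + 1 from by ring,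
      show 2 * k + 4 = 2 * (k + 1) + 2 from by ring,
      show 2 * k + 5 = 2 * (k + 1) + 3 from by ring]
    exact ih (k + 1) _ (by simp)

-- ===== VERDICT (by name: the statement is the Claim_ definition above) =====
theorem skiponacci_spec : Claim_equal_skiponacci := by
  intro n _
  show skiponacci n = skiponacci_alt n
  unfold skiponacci skiponacci_alt
  have h1 : ("1" : String) = PySem.Str.join " " ["1"] := rfl
  rw [h1]
  have := loop_eq (n - 1).toNat 0 ["1"] (by simp)
  simpa [pvFib] using this
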